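-- pv_equiv track=rewrite | github.com/DavidivoWang/tonesoul-mirrortone | scripts/run_doc_convergence_inventory.py | _collision_family
-- ===== SOURCE A (Python) =====
-- def _collision_family(paths: list[str]) -> str:
--     if all(
--         path.startswith("docs/engineering/") or path.startswith("law/engineering/")
--         for path in paths
--     ):
--         return "docs_law_engineering_mirror"
--     if any(path.startswith("PARADOXES/") for path in paths) and any(
--         path.startswith("tests/fixtures/paradoxes/") for path in paths
--     ):
--         return "paradox_fixture_mirror"
--     if any(path.startswith("scripts/legacy/") for path in paths) and any(
--         path.startswith("scripts/") and not path.startswith("scripts/legacy/") for path in paths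
--     ):
--         return "legacy_shadow"
--     if (
--         paths
--         and all(path.startswith("docs/status/") for path in paths)
--         and any("/probe_" in path for path in paths)
--     ):
--         return "probe_status_series"
--     if (
--         paths
--         and all(path.startswith("memory/autonomous/") for path in paths)
--         and any("/probe_" in path for path in paths)
--     ):
--         return "probe_memory_series"
--     if any(path == "README.md" for path in paths):
--         return "readme_family"
--     return "manual_review"
-- ===== SOURCE B (Python) =====
-- def _collision_family(paths: list[str]) -> str:
--     # One pass over paths accumulating all the boolean evidence, then the same
--     # ordered cascade over the flags.
--     nonempty = False
--     all_docs_law = True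
--     has_paradox = False
--     has_paradox_fixture = False
--     has_legacy = False
--     has_nonlegacy_script = False
--     all_status = True
--     all_memory = True
--     has_probe = False
--     has_readme = False
--     for p in paths:
--         nonempty = True
--         all_docs_law = all_docs_law and (
--             p.startswith("docs/engineering/") or p.startswith("law/engineering/")
--         )
--         has_paradox = has_paradox or p.startswith("PARADOXES/")
--         has_paradox_fixture = has_paradox_fixture or p.startswith("tests/fixtures/paradoxes/")
--         has_legacy = has_legacy or p.startswith("scripts/legacy/")
--         has_nonlegacy_script = has_nonlegacy_script or (
--             p.startswith("scripts/") and not p.startswith("scripts/legacy/")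
--         )
--         all_status = all_status and p.startswith("docs/status/")
--         all_memory = all_memory and p.startswith("memory/autonomous/")
--         has_probe = has_probe or "/probe_" in p
--         has_readme = has_readme or p == "README.md"
--     if all_docs_law:
--         return "docs_law_engineering_mirror"
--     if has_paradox and has_paradox_fixture:
--         return "paradox_fixture_mirror"
--     if has_legacy and has_nonlegacy_script:
--         return "legacy_shadow"
--     if nonempty and all_status and has_probe:
--         return "probe_status_series"
--     if nonempty and all_memory and has_probe:
--         return "probe_memory_series"
--     if has_readme:
--         return "readme_family"
--     return "manual_review"
-- ===== Notes on version B (the rewrite author's own statement) =====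
-- stated objective: alternative
-- what changed: Replaces A's nine separate all()/any() generator scans over paths with a single loop that accumulates ten boolean flags, followed by the same ordered cascade over the flags.
import Mathlib
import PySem

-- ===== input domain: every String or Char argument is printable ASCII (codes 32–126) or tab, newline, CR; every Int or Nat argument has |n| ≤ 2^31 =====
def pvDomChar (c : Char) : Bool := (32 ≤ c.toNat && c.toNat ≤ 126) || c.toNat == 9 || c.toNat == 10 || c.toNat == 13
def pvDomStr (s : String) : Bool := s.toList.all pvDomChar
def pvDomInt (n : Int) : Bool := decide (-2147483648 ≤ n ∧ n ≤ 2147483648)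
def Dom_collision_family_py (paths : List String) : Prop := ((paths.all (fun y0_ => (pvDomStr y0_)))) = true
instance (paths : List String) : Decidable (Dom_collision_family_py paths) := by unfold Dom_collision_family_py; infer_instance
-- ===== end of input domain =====

-- B replaces A's nine separate all()/any() scans with one flag-accumulating pass; same result (objective: alternative).

-- ===== PORT A =====
def collision_family_py (paths : List String) : String :=
  if paths.all (fun p => PySem.Str.startswith p "docs/engineering/" || PySem.Str.startswith p "law/engineering/") then
    "docs_law_engineering_mirror"
  else if (paths.any (fun p => PySem.Str.startswith p "PARADOXES/")) &&
          (paths.any (fun p => PySem.Str.startswith p "tests/fixtures/paradoxes/")) then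
    "paradox_fixture_mirror"
  else if (paths.any (fun p => PySem.Str.startswith p "scripts/legacy/")) &&
          (paths.any (fun p => PySem.Str.startswith p "scripts/" && !PySem.Str.startswith p "scripts/legacy/")) then
    "legacy_shadow"
  else if (!paths.isEmpty) && paths.all (fun p => PySem.Str.startswith p "docs/status/") &&
          paths.any (fun p => PySem.Str.isIn "/probe_" p) then
    "probe_status_series"
  else if (!paths.isEmpty) && paths.all (fun p => PySem.Str.startswith p "memory/autonomous/") &&
          paths.any (fun p => PySem.Str.isIn "/probe_" p) then
    "probe_memory_series"
  else if paths.any (fun p => p == "README.md") then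
    "readme_family"
  else
    "manual_review"

-- ===== PORT B =====
-- the ten accumulated flags of Source B's single loop, in declaration order
structure CFFlags where
  nonempty : Bool
  allDocsLaw : Bool
  hasParadox : Bool
  hasParadoxFixture : Bool
  hasLegacy : Bool
  hasNonlegacyScript : Bool
  allStatus : Bool
  allMemory : Bool
  hasProbe : Bool
  hasReadme : Bool
deriving Repr, DecidableEq

def cfStep (f : CFFlags) (p : String) : CFFlags :=
  { nonempty := true
    allDocsLaw := f.allDocsLaw && (PySem.Str.startswith p "docs/engineering/" || PySem.Str.startswith p "law/engineering/")
    hasParadox := f.hasParadox || PySem.Str.startswith p "PARADOXES/"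
    hasParadoxFixture := f.hasParadoxFixture || PySem.Str.startswith p "tests/fixtures/paradoxes/"
    hasLegacy := f.hasLegacy || PySem.Str.startswith p "scripts/legacy/"
    hasNonlegacyScript := f.hasNonlegacyScript || (PySem.Str.startswith p "scripts/" && !PySem.Str.startswith p "scripts/legacy/")
    allStatus := f.allStatus && PySem.Str.startswith p "docs/status/"
    allMemory := f.allMemory && PySem.Str.startswith p "memory/autonomous/"
    hasProbe := f.hasProbe || PySem.Str.isIn "/probe_" p
    hasReadme := f.hasReadme || p == "README.md" }

def cfInit : CFFlags :=
  { nonempty := false, allDocsLaw := true, hasParadox := false, hasParadoxFixture := false,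
    hasLegacy := false, hasNonlegacyScript := false, allStatus := true, allMemory := true,
    hasProbe := false, hasReadme := false }

def collision_family_py_alt (paths : List String) : String :=
  let f := paths.foldl cfStep cfInit
  if f.allDocsLaw then "docs_law_engineering_mirror"
  else if f.hasParadox && f.hasParadoxFixture then "paradox_fixture_mirror"
  else if f.hasLegacy && f.hasNonlegacyScript then "legacy_shadow"
  else if f.nonempty && f.allStatus && f.hasProbe then "probe_status_series"
  else if f.nonempty && f.allMemory && f.hasProbe then "probe_memory_series"
  else if f.hasReadme then "readme_family"
  else "manual_review"

-- ===== PRECONDITION & SPEC =====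
def Spec_collision_family_py (paths : List String) (out : String) : Prop := out = collision_family_py_alt paths
instance (paths : List String) (out : String) : Decidable (Spec_collision_family_py paths out) := by unfold Spec_collision_family_py; infer_instance

-- ===== CLAIM (what is proved, stated in full; the proofs are below) =====
def Claim_equal_collision_family_py : Prop := ∀ (paths : List String), Dom_collision_family_py paths → Spec_collision_family_py paths (collision_family_py paths)

-- ===== LEMMAS AND PROOFS =====

-- the loop state after folding over `paths` from any start state, field by field
theorem cf_foldl (paths : List String) (f : CFFlags) :
    paths.foldl cfStep f =
      { nonempty := f.nonempty || !paths.isEmpty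
        allDocsLaw := f.allDocsLaw && paths.all (fun p => PySem.Str.startswith p "docs/engineering/" || PySem.Str.startswith p "law/engineering/")
        hasParadox := f.hasParadox || paths.any (fun p => PySem.Str.startswith p "PARADOXES/")
        hasParadoxFixture := f.hasParadoxFixture || paths.any (fun p => PySem.Str.startswith p "tests/fixtures/paradoxes/")
        hasLegacy := f.hasLegacy || paths.any (fun p => PySem.Str.startswith p "scripts/legacy/")
        hasNonlegacyScript := f.hasNonlegacyScript || paths.any (fun p => PySem.Str.startswith p "scripts/" && !PySem.Str.startswith p "scripts/legacy/")
        allStatus := f.allStatus && paths.all (fun p => PySem.Str.startswith p "docs/status/")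
        allMemory := f.allMemory && paths.all (fun p => PySem.Str.startswith p "memory/autonomous/")
        hasProbe := f.hasProbe || paths.any (fun p => PySem.Str.isIn "/probe_" p)
        hasReadme := f.hasReadme || paths.any (fun p => p == "README.md") } := by
  induction paths generalizing f with
  | nil => simp
  | cons p t ih =>
    simp only [List.foldl_cons, ih, List.all_cons, List.any_cons, List.isEmpty_cons, cfStep]
    simp [Bool.and_assoc, Bool.or_assoc]

-- ===== VERDICT (by name: the statement is the Claim_ definition above) =====
theorem collision_family_py_spec : Claim_equal_collision_family_py := by
  intro paths _
  show collision_family_py paths = collision_family_py_alt paths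
  simp only [collision_family_py, collision_family_py_alt, cf_foldl, cfInit]
  simp
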